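-- pv_equiv track=rewrite | github.com/Emma-Leonhart/shrine-label-generator | koreanizer.py | tokenize_romaji_korean
-- ===== SOURCE A (Python) =====
-- ROMAJI_TO_HANGUL = {
--     # Vowels
--     "a": "아", "i": "이", "u": "우", "e": "에", "o": "오",
--
--     # K-row
--     "ka": "카", "ki": "키", "ku": "쿠", "ke": "케", "ko": "코",
--
--     # S-row
--     "sa": "사", "shi": "시", "su": "스", "se": "세", "so": "소",
--
--     # T-row
--     "ta": "타", "chi": "치", "tsu": "쓰", "tu": "쓰", "te": "테", "to": "토",
--
--     # N-row
--     "na": "나", "ni": "니", "nu": "누", "ne": "네", "no": "노",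
--
--     # H-row
--     "ha": "하", "hi": "히", "hu": "후", "fu": "후", "he": "헤", "ho": "호",
--
--     # M-row
--     "ma": "마", "mi": "미", "mu": "무", "me": "메", "mo": "모",
--
--     # Y-row
--     "ya": "야", "yu": "유", "yo": "요",
--
--     # R-row
--     "ra": "라", "ri": "리", "ru": "루", "re": "레", "ro": "로",
--
--     # W-row
--     "wa": "와", "wi": "위", "we": "웨", "wo": "오",
--
--     # Standalone n (ん) — handled specially below
--     "n": "ㄴ",
--
--     # Voiced: G-row
--     "ga": "가", "gi": "기", "gu": "구", "ge": "게", "go": "고",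
--
--     # Voiced: Z-row
--     "za": "자", "ji": "지", "zu": "즈", "ze": "제", "zo": "조",
--
--     # Voiced: D-row
--     "da": "다", "di": "지", "du": "즈", "de": "데", "do": "도",
--
--     # Voiced: B-row
--     "ba": "바", "bi": "비", "bu": "부", "be": "베", "bo": "보",
--
--     # P-row
--     "pa": "파", "pi": "피", "pu": "푸", "pe": "페", "po": "포",
-- }
--
-- YOON_TO_HANGUL = {
--     "kya": "캬", "kyu": "큐", "kyo": "쿄",
--     "sha": "샤", "shu": "슈", "sho": "쇼",
--     "cha": "차", "chu": "추", "cho": "초",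
--     "nya": "냐", "nyu": "뉴", "nyo": "뇨",
--     "hya": "햐", "hyu": "휴", "hyo": "효",
--     "mya": "먀", "myu": "뮤", "myo": "묘",
--     "rya": "랴", "ryu": "류", "ryo": "료",
--     "gya": "갸", "gyu": "규", "gyo": "교",
--     "ja": "자",  "ju": "주",  "jo": "조",
--     "bya": "뱌", "byu": "뷰", "byo": "뵤",
--     "pya": "퍄", "pyu": "퓨", "pyo": "표",
--     "dya": "댜", "dyu": "듀", "dyo": "됴",
-- }
--
-- def tokenize_romaji_korean(text):
--     """Tokenize romaji for Korean mapping (uses same logic as tokiponizer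
--     but checks Korean-specific maps)."""
--     tokens = []
--     i = 0
--     while i < len(text):
--         matched = False
--         for size in (3, 2, 1):
--             chunk = text[i:i+size]
--             if chunk in YOON_TO_HANGUL or chunk in ROMAJI_TO_HANGUL:
--                 tokens.append(chunk)
--                 i += size
--                 matched = True
--                 break
--         if not matched:
--             i += 1
--     return tokens
-- ===== SOURCE B (Python) =====
-- ROMAJI_TO_HANGUL = {
--     "a": "아", "i": "이", "u": "우", "e": "에", "o": "오",
--     "ka": "카", "ki": "키", "ku": "쿠", "ke": "케", "ko": "코",
--     "sa": "사", "shi": "시", "su": "스", "se": "세", "so": "소",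
--     "ta": "타", "chi": "치", "tsu": "쓰", "tu": "쓰", "te": "테", "to": "토",
--     "na": "나", "ni": "니", "nu": "누", "ne": "네", "no": "노",
--     "ha": "하", "hi": "히", "hu": "후", "fu": "후", "he": "헤", "ho": "호",
--     "ma": "마", "mi": "미", "mu": "무", "me": "메", "mo": "모",
--     "ya": "야", "yu": "유", "yo": "요",
--     "ra": "라", "ri": "리", "ru": "루", "re": "레", "ro": "로",
--     "wa": "와", "wi": "위", "we": "웨", "wo": "오",
--     "n": "ㄴ",
--     "ga": "가", "gi": "기", "gu": "구", "ge": "게", "go": "고",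
--     "za": "자", "ji": "지", "zu": "즈", "ze": "제", "zo": "조",
--     "da": "다", "di": "지", "du": "즈", "de": "데", "do": "도",
--     "ba": "바", "bi": "비", "bu": "부", "be": "베", "bo": "보",
--     "pa": "파", "pi": "피", "pu": "푸", "pe": "페", "po": "포",
-- }
--
-- YOON_TO_HANGUL = {
--     "kya": "캬", "kyu": "큐", "kyo": "쿄",
--     "sha": "샤", "shu": "슈", "sho": "쇼",
--     "cha": "차", "chu": "추", "cho": "초",
--     "nya": "냐", "nyu": "뉴", "nyo": "뇨",
--     "hya": "햐", "hyu": "휴", "hyo": "효",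
--     "mya": "먀", "myu": "뮤", "myo": "묘",
--     "rya": "랴", "ryu": "류", "ryo": "료",
--     "gya": "갸", "gyu": "규", "gyo": "교",
--     "ja": "자",  "ju": "주",  "jo": "조",
--     "bya": "뱌", "byu": "뷰", "byo": "뵤",
--     "pya": "퍄", "pyu": "퓨", "pyo": "표",
--     "dya": "댜", "dyu": "듀", "dyo": "됴",
-- }
--
-- # One flat token alphabet, arranged longest-first once at import time: greedy
-- # tokenization is then a single first-match scan (same alternatives, same
-- # preference order, as the equivalent longest-first regex alternation).
-- _KEYS_ALL = list(YOON_TO_HANGUL) + list(ROMAJI_TO_HANGUL)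
-- _KEYS = ([k for k in _KEYS_ALL if len(k) == 3]
--          + [k for k in _KEYS_ALL if len(k) == 2]
--          + [k for k in _KEYS_ALL if len(k) == 1])
--
--
-- def tokenize_romaji_korean(text):
--     """Tokenize romaji for Korean mapping (uses same logic as tokiponizer
--     but checks Korean-specific maps)."""
--     tokens = []
--     i = 0
--     n = len(text)
--     while i < n:
--         k = next((k for k in _KEYS if text.startswith(k, i)), None)
--         if k is None:
--             i += 1
--         else:
--             tokens.append(k)
--             i += len(k)
--     return tokens
-- ===== Notes on version B (the rewrite author's own statement) =====
-- stated objective: alternative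
-- what changed: B precomputes one flat token alphabet sorted longest-first and tokenizes with a single first-prefix-match scan per position (the longest-first regex-alternation strategy), replacing A's per-position size-probe slicing (3,2,1) with membership tests against two separate dicts and a matched flag.
import Mathlib
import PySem

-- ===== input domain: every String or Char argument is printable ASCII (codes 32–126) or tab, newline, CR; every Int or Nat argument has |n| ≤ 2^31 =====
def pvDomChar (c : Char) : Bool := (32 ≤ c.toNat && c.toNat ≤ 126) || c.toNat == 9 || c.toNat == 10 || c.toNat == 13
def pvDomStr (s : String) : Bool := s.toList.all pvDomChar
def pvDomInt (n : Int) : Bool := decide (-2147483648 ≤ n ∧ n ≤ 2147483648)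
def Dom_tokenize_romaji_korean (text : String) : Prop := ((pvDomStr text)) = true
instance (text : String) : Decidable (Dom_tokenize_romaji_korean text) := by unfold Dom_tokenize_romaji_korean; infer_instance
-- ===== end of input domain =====

-- B replaces A's per-position size-probe slicing against two dicts by one flat token
-- alphabet sorted longest-first and a single first-prefix-match scan (objective: alternative).

-- ===== PORT A =====
-- The two module dicts are only ever used for key-membership tests, so only their key
-- lists (in dict insertion order) are needed; the hangul values never influence the result.
def yoonKeys : List String := ["kya", "kyu", "kyo", "sha", "shu", "sho", "cha", "chu", "cho", "nya", "nyu", "nyo", "hya", "hyu", "hyo", "mya", "myu", "myo", "rya", "ryu", "ryo", "gya", "gyu", "gyo", "ja", "ju", "jo", "bya", "byu", "byo", "pya", "pyu", "pyo", "dya", "dyu", "dyo"]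

def romajiKeys : List String := ["a", "i", "u", "e", "o", "ka", "ki", "ku", "ke", "ko", "sa", "shi", "su", "se", "so", "ta", "chi", "tsu", "tu", "te", "to", "na", "ni", "nu", "ne", "no", "ha", "hi", "hu", "fu", "he", "ho", "ma", "mi", "mu", "me", "mo", "ya", "yu", "yo", "ra", "ri", "ru", "re", "ro", "wa", "wi", "we", "wo", "n", "ga", "gi", "gu", "ge", "go", "za", "ji", "zu", "ze", "zo", "da", "di", "du", "de", "do", "ba", "bi", "bu", "be", "bo", "pa", "pi", "pu", "pe", "po"]

-- A's while-loop over i; text[i:i+size] with 0 ≤ i is exactly (drop i).take size,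
-- and the unrolled (3,2,1)-for with break is the nested if-chain below.
def tokA (t : List Char) (i : Nat) : List String :=
  if _h : i < t.length then
    if String.ofList ((t.drop i).take 3) ∈ yoonKeys ∨ String.ofList ((t.drop i).take 3) ∈ romajiKeys then
      String.ofList ((t.drop i).take 3) :: tokA t (i + 3)
    else if String.ofList ((t.drop i).take 2) ∈ yoonKeys ∨ String.ofList ((t.drop i).take 2) ∈ romajiKeys then
      String.ofList ((t.drop i).take 2) :: tokA t (i + 2)
    else if String.ofList ((t.drop i).take 1) ∈ yoonKeys ∨ String.ofList ((t.drop i).take 1) ∈ romajiKeys then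
      String.ofList ((t.drop i).take 1) :: tokA t (i + 1)
    else tokA t (i + 1)
  else []
termination_by t.length - i
decreasing_by all_goals omega

def tokenize_romaji_korean (text : String) : List String := tokA text.toList 0

-- ===== PORT B =====
-- Source B's module constants: _KEYS_ALL = list(YOON_TO_HANGUL) + list(ROMAJI_TO_HANGUL),
-- and _KEYS = the length-3 keys, then the length-2 keys, then the length-1 keys.
def allKeysBase : List String := yoonKeys ++ romajiKeys
def allKeys : List String :=
  allKeysBase.filter (fun k => k.toList.length == 3)
    ++ allKeysBase.filter (fun k => k.toList.length == 2)
    ++ allKeysBase.filter (fun k => k.toList.length == 1)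

-- needed by tokB's termination: every key is a nonempty string
theorem allKeys_pos : ∀ k ∈ allKeys, 1 ≤ k.toList.length := by
  intro k hk
  rcases List.mem_append.mp hk with h | h
  · rcases List.mem_append.mp h with h | h <;>
    · have h2 := (List.mem_filter.mp h).2
      simp at h2 ⊢
      omega
  · have h2 := (List.mem_filter.mp h).2
    simp at h2 ⊢
    omega

-- Source B's while-loop: k = next((k for k in _KEYS if text.startswith(k, i)), None);
-- str.startswith(k, i) with 0 ≤ i is exactly k.toList.isPrefixOf (t.drop i).
def tokB (t : List Char) (i : Nat) : List String :=
  if _h : i < t.length then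
    match hk : List.find? (fun k => k.toList.isPrefixOf (t.drop i)) allKeys with
    | some k => k :: tokB t (i + k.toList.length)
    | none => tokB t (i + 1)
  else []
termination_by t.length - i
decreasing_by
  · have hm := List.mem_of_find?_eq_some hk
    have h1 := allKeys_pos _ hm
    omega
  · omega

def tokenize_romaji_korean_alt (text : String) : List String := tokB text.toList 0

-- ===== PRECONDITION & SPEC =====
def Spec_tokenize_romaji_korean (text : String) (out : List String) : Prop := out = tokenize_romaji_korean_alt text
instance (text : String) (out : List String) : Decidable (Spec_tokenize_romaji_korean text out) := by unfold Spec_tokenize_romaji_korean; infer_instance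

-- ===== CLAIM (what is proved, stated in full; the proofs are below) =====
def Claim_equal_tokenize_romaji_korean : Prop := ∀ (text : String), Dom_tokenize_romaji_korean text → Spec_tokenize_romaji_korean text (tokenize_romaji_korean text)

-- ===== LEMMAS AND PROOFS =====

-- the keys grouped by length, longest first (the three segments of allKeys)
def K3 : List String := allKeysBase.filter (fun k => k.toList.length == 3)
def K2 : List String := allKeysBase.filter (fun k => k.toList.length == 2)
def K1 : List String := allKeysBase.filter (fun k => k.toList.length == 1)

theorem allKeys_grouped : allKeys = K3 ++ K2 ++ K1 := rfl
theorem K3len : ∀ k ∈ K3, k.toList.length = 3 := by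
  intro k hk
  have h := (List.mem_filter.mp hk).2
  simpa using h
theorem K2len : ∀ k ∈ K2, k.toList.length = 2 := by
  intro k hk
  have h := (List.mem_filter.mp hk).2
  simpa using h
theorem K1len : ∀ k ∈ K1, k.toList.length = 1 := by
  intro k hk
  have h := (List.mem_filter.mp hk).2
  simpa using h

theorem memU3 (x : String) (hx : x.toList.length = 3) : (x ∈ yoonKeys ∨ x ∈ romajiKeys) ↔ x ∈ K3 := by
  have hx' : x.length = 3 := by simpa using hx
  simp [K3, allKeysBase, List.mem_filter, List.mem_append, hx']

theorem memU2 (x : String) (hx : x.toList.length = 2) : (x ∈ yoonKeys ∨ x ∈ romajiKeys) ↔ x ∈ K2 := by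
  have hx' : x.length = 2 := by simpa using hx
  simp [K2, allKeysBase, List.mem_filter, List.mem_append, hx']

theorem memU1 (x : String) (hx : x.toList.length = 1) : (x ∈ yoonKeys ∨ x ∈ romajiKeys) ↔ x ∈ K1 := by
  have hx' : x.length = 1 := by simpa using hx
  simp [K1, allKeysBase, List.mem_filter, List.mem_append, hx']

theorem not_mem_group (x : String) (n : Nat) (L : List String) (hL : ∀ k ∈ L, k.toList.length = n) (hx : x.toList.length ≠ n) : x ∉ L :=
  fun h => hx (hL x h)

theorem my_find_append {α : Type} (p : α → Bool) (l1 l2 : List α) :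
    List.find? p (l1 ++ l2) = (List.find? p l1).or (List.find? p l2) := by
  induction l1 with
  | nil => rfl
  | cons a l ih =>
    by_cases h : p a
    · simp [h, Option.or]
    · simp [h, ih]

theorem find_group (r : List Char) (n : Nat) (L : List String) (hL : ∀ k ∈ L, k.toList.length = n) :
    List.find? (fun k => k.toList.isPrefixOf r) L
      = if String.ofList (r.take n) ∈ L then some (String.ofList (r.take n)) else none := by
  induction L with
  | nil => simp
  | cons k L ih =>
    have hk := hL k (List.mem_cons_self)
    have hL' : ∀ x ∈ L, x.toList.length = n := fun x hx => hL x (List.mem_cons_of_mem k hx)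
    by_cases hp : k.toList <+: r
    · have h1 : k.toList = r.take n := by
        have h2 := List.prefix_iff_eq_take.mp hp
        rwa [hk] at h2
      have h2 : String.ofList (r.take n) = k := by
        rw [← h1, String.ofList_toList]
      have hb : (fun k : String => k.toList.isPrefixOf r) k = true :=
        List.isPrefixOf_iff_prefix.mpr hp
      rw [List.find?_cons_of_pos (p := fun k : String => k.toList.isPrefixOf r) (a := k) (l := L) hb, h2,
        if_pos (List.mem_cons_self)]
    · have hb : ¬ (fun k : String => k.toList.isPrefixOf r) k = true :=
        fun hh => hp (List.isPrefixOf_iff_prefix.mp hh)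
      have hne : String.ofList (r.take n) ≠ k := by
        intro he
        apply hp
        have h1 : k.toList = r.take n := by rw [← he, String.toList_ofList]
        rw [h1]
        exact List.take_prefix n r
      rw [List.find?_cons_of_neg (p := fun k : String => k.toList.isPrefixOf r) (a := k) (l := L) hb, ih hL']
      by_cases hm : String.ofList (r.take n) ∈ L
      · rw [if_pos hm, if_pos (List.mem_cons_of_mem k hm)]
      · rw [if_neg hm, if_neg (by simp [List.mem_cons, hne, hm])]

theorem find_allKeys (r : List Char) :
    List.find? (fun k => k.toList.isPrefixOf r) allKeys =
      if String.ofList (r.take 3) ∈ K3 then some (String.ofList (r.take 3))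
      else if String.ofList (r.take 2) ∈ K2 then some (String.ofList (r.take 2))
      else if String.ofList (r.take 1) ∈ K1 then some (String.ofList (r.take 1))
      else none := by
  rw [allKeys_grouped, my_find_append, my_find_append,
      find_group r 3 K3 K3len, find_group r 2 K2 K2len, find_group r 1 K1 K1len]
  by_cases h3 : String.ofList (r.take 3) ∈ K3 <;>
    by_cases h2 : String.ofList (r.take 2) ∈ K2 <;>
      by_cases h1 : String.ofList (r.take 1) ∈ K1 <;>
        simp [h3, h2, h1, Option.or]

theorem tokA_nil (t : List Char) (i : Nat) (h : ¬ i < t.length) : tokA t i = [] := by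
  rw [tokA.eq_def]
  simp [h]

theorem tokB_nil (t : List Char) (i : Nat) (h : ¬ i < t.length) : tokB t i = [] := by
  rw [tokB.eq_def]
  simp [h]

theorem tokB_some (t : List Char) (i : Nat) (k : String) (h : i < t.length)
    (hf : List.find? (fun k => k.toList.isPrefixOf (t.drop i)) allKeys = some k) :
    tokB t i = k :: tokB t (i + k.toList.length) := by
  rw [tokB.eq_def, dif_pos h]
  split
  · rename_i k' hk'
    rw [hf] at hk'
    cases hk'
    rfl
  · rename_i hk'
    rw [hf] at hk'
    cases hk'

theorem tokB_none (t : List Char) (i : Nat) (h : i < t.length)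
    (hf : List.find? (fun k => k.toList.isPrefixOf (t.drop i)) allKeys = none) :
    tokB t i = tokB t (i + 1) := by
  rw [tokB.eq_def, dif_pos h]
  split
  · rename_i k' hk'
    rw [hf] at hk'
    cases hk'
  · rfl

theorem len_ofList_take (r : List Char) (n : Nat) (h : n ≤ r.length) :
    (String.ofList (r.take n)).toList.length = n := by
  rw [String.toList_ofList, List.length_take]
  omega

theorem tok_eq_aux : ∀ (d : Nat) (t : List Char) (i : Nat), t.length - i ≤ d → tokA t i = tokB t i := by
  intro d
  induction d with
  | zero =>
    intro t i hle
    have hi : ¬ i < t.length := by omega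
    rw [tokA_nil t i hi, tokB_nil t i hi]
  | succ d ih =>
    intro t i hle
    by_cases hi : i < t.length
    · have hrlen : (t.drop i).length = t.length - i := List.length_drop
      rw [tokA.eq_def, dif_pos hi]
      rcases Nat.lt_or_ge (t.drop i).length 3 with hsm | h3
      · rcases Nat.lt_or_ge (t.drop i).length 2 with hsm1 | h2
        · -- exactly one character remains
          have hlen1 : (t.drop i).length = 1 := by omega
          have e3 : (t.drop i).take 3 = t.drop i := List.take_of_length_le (by omega)
          have e2 : (t.drop i).take 2 = t.drop i := List.take_of_length_le (by omega)
          have e1 : (t.drop i).take 1 = t.drop i := List.take_of_length_le (by omega)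
          have l1 : (String.ofList (t.drop i)).toList.length = 1 := by
            rw [String.toList_ofList]; omega
          rw [e3, e2, e1]
          have hfa := find_allKeys (t.drop i)
          rw [e3, e2, e1] at hfa
          have hn3 : String.ofList (t.drop i) ∉ K3 := not_mem_group _ 3 K3 K3len (by omega)
          have hn2 : String.ofList (t.drop i) ∉ K2 := not_mem_group _ 2 K2 K2len (by omega)
          rw [if_neg hn3, if_neg hn2] at hfa
          by_cases hc1 : String.ofList (t.drop i) ∈ K1
          · rw [if_pos ((memU1 _ l1).mpr hc1)]
            rw [if_pos hc1] at hfa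
            rw [tokB_some t i _ hi hfa, l1]
            have hA : tokA t (i + 3) = [] := tokA_nil _ _ (by omega)
            have hB : tokB t (i + 1) = [] := tokB_nil _ _ (by omega)
            rw [hA, hB]
          · rw [if_neg hc1] at hfa
            have hcU : ¬ (String.ofList (t.drop i) ∈ yoonKeys ∨ String.ofList (t.drop i) ∈ romajiKeys) :=
              fun h => hc1 ((memU1 _ l1).mp h)
            rw [if_neg hcU, if_neg hcU, if_neg hcU]
            rw [tokB_none t i hi hfa]
            exact ih t (i + 1) (by omega)
        · -- exactly two characters remain
          have hlen2 : (t.drop i).length = 2 := by omega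
          have e3 : (t.drop i).take 3 = t.drop i := List.take_of_length_le (by omega)
          have e2 : (t.drop i).take 2 = t.drop i := List.take_of_length_le (by omega)
          have l2 : (String.ofList (t.drop i)).toList.length = 2 := by
            rw [String.toList_ofList]; omega
          have l1 : (String.ofList ((t.drop i).take 1)).toList.length = 1 :=
            len_ofList_take _ 1 (by omega)
          rw [e3, e2]
          have hfa := find_allKeys (t.drop i)
          rw [e3, e2] at hfa
          have hn3 : String.ofList (t.drop i) ∉ K3 := not_mem_group _ 3 K3 K3len (by omega)
          rw [if_neg hn3] at hfa
          by_cases hc2 : String.ofList (t.drop i) ∈ K2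
          · rw [if_pos ((memU2 _ l2).mpr hc2)]
            rw [if_pos hc2] at hfa
            rw [tokB_some t i _ hi hfa, l2]
            have hA : tokA t (i + 3) = [] := tokA_nil _ _ (by omega)
            have hB : tokB t (i + 2) = [] := tokB_nil _ _ (by omega)
            rw [hA, hB]
          · rw [if_neg hc2] at hfa
            have hcU : ¬ (String.ofList (t.drop i) ∈ yoonKeys ∨ String.ofList (t.drop i) ∈ romajiKeys) :=
              fun h => hc2 ((memU2 _ l2).mp h)
            rw [if_neg hcU, if_neg hcU]
            by_cases hc1 : String.ofList ((t.drop i).take 1) ∈ K1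
            · rw [if_pos ((memU1 _ l1).mpr hc1)]
              rw [if_pos hc1] at hfa
              rw [tokB_some t i _ hi hfa, l1]
              exact congrArg _ (ih t (i + 1) (by omega))
            · rw [if_neg hc1] at hfa
              rw [if_neg (fun h => hc1 ((memU1 _ l1).mp h))]
              rw [tokB_none t i hi hfa]
              exact ih t (i + 1) (by omega)
      · -- at least three characters remain
        have l3 : (String.ofList ((t.drop i).take 3)).toList.length = 3 := len_ofList_take _ 3 h3
        have l2 : (String.ofList ((t.drop i).take 2)).toList.length = 2 := len_ofList_take _ 2 (by omega)
        have l1 : (String.ofList ((t.drop i).take 1)).toList.length = 1 := len_ofList_take _ 1 (by omega)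
        have hfa := find_allKeys (t.drop i)
        by_cases hc3 : String.ofList ((t.drop i).take 3) ∈ K3
        · rw [if_pos ((memU3 _ l3).mpr hc3)]
          rw [if_pos hc3] at hfa
          rw [tokB_some t i _ hi hfa, l3]
          exact congrArg _ (ih t (i + 3) (by omega))
        · rw [if_neg (fun h => hc3 ((memU3 _ l3).mp h))]
          rw [if_neg hc3] at hfa
          by_cases hc2 : String.ofList ((t.drop i).take 2) ∈ K2
          · rw [if_pos ((memU2 _ l2).mpr hc2)]
            rw [if_pos hc2] at hfa
            rw [tokB_some t i _ hi hfa, l2]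
            exact congrArg _ (ih t (i + 2) (by omega))
          · rw [if_neg (fun h => hc2 ((memU2 _ l2).mp h))]
            rw [if_neg hc2] at hfa
            by_cases hc1 : String.ofList ((t.drop i).take 1) ∈ K1
            · rw [if_pos ((memU1 _ l1).mpr hc1)]
              rw [if_pos hc1] at hfa
              rw [tokB_some t i _ hi hfa, l1]
              exact congrArg _ (ih t (i + 1) (by omega))
            · rw [if_neg (fun h => hc1 ((memU1 _ l1).mp h))]
              rw [if_neg hc1] at hfa
              rw [tokB_none t i hi hfa]
              exact ih t (i + 1) (by omega)
    · rw [tokA_nil t i hi, tokB_nil t i hi]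

-- ===== VERDICT (by name: the statement is the Claim_ definition above) =====
theorem tokenize_romaji_korean_spec : Claim_equal_tokenize_romaji_korean := by
  intro text _h
  unfold Spec_tokenize_romaji_korean tokenize_romaji_korean tokenize_romaji_korean_alt
  exact tok_eq_aux text.toList.length text.toList 0 (by omega)
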